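-- pv_equiv track=rewrite | github.com/IoanaGabor/University | Semester-1/Fundamentals Of Programming/assignments/a1-913-Gabor-Ioana/p3.py | count_days_since_year_zero
-- ===== SOURCE A (Python) =====
-- def check_if_leap_year(year):
--     """Checks if a given year is a leap year.
--
--     :param year: positive integer
--     :return: boolean
--     """
--     if year % 4 != 0:
--         return False
--     elif year % 100 != 0:
--         return True
--     elif year % 400 != 0:
--         return False
--     else:
--         return True
--
-- def check_if_leap_day_this_year(date):
--     """Checks if a leap day has happened in the current year, before a given date.
--
--     :param date: tuple (year, month, day)
--     :return: boolean (True if a leap day has happened in the current year, False otherwise)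
--     """
--     year = date[0]
--     month = date[1]
--     day = date[2]
--     leap_day_this_year = False
--     if check_if_leap_year(year):
--         if month > 2 or (month == 2 and day == 29):
--             leap_day_this_year = True
--     return leap_day_this_year
--
-- def count_leap_days_since_year_zero(date):
--     """Counts leap days since 1 Jan, year 0.
--
--     :param date: tuple (year, month, day)
--     :return: positive integer
--     """
--     year = date[0]
--     divisible_by_4 = (year - 1) // 4 + 1
--     divisible_by_100 = (year - 1) // 100 + 1
--     divisible_by_400 = (year - 1) // 400 + 1
--     leap_day_this_year = int(check_if_leap_day_this_year(date))
--     return divisible_by_4 - divisible_by_100 + divisible_by_400 + leap_day_this_year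
--
-- def count_days_since_year_zero(date):
--     """Counts the total number of days since 1 Jan, year 0.
--
--     :param date: tuple (year, month, day)
--     :return: number of days (natural number)
--     """
--     months = [0, 31, 28, 31, 30, 31, 30, 31, 31, 30, 31, 30, 31]
--     sum_months = [0]
--     for i in range(1, len(months)):
--         sum_months.append(sum_months[i - 1] + months[i])
--     year = date[0]
--     month = date[1]
--     day = date[2]
--     days_before_this_year = year * 365
--     leap_days = count_leap_days_since_year_zero(date)
--     days_this_year = sum_months[month - 1] + day
--
--     return days_before_this_year + leap_days + days_this_year
-- ===== SOURCE B (Python) =====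
-- def count_days_since_year_zero(date):
--     year, month, day = date
--     def is_leap(y):
--         return y % 4 == 0 and (y % 100 != 0 or y % 400 == 0)
--     def month_len(m, y):
--         if m == 2:
--             return 29 if is_leap(y) else 28
--         return 31 if m in (1, 3, 5, 7, 8, 10, 12) else 30
--     leaps_before = (year - 1) // 4 - (year - 1) // 100 + (year - 1) // 400 + 1
--     days_in_months = sum(month_len(m, year) for m in range(1, month))
--     return 365 * year + leaps_before + days_in_months + day
-- ===== Notes on version B (the rewrite author's own statement) =====
-- stated objective: simpler
-- what changed: Replaces the built cumulative month table plus a separate leap-day-indicator helper with a per-month length function (Feb = 29 in leap years) summed over the elapsed months, folding the leap-day adjustment into the month lengths.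
-- intended difference: On Feb 29 of a leap year A adds the leap day twice (once via day in the month offset, once via leap_day_this_year), giving Feb 29 the same count as Mar 1; B counts it once, which is the intended ordinal. — e.g. on count_days_since_year_zero(2024, 2, 29): A returns 739312, B returns 739311
-- outside the precondition, e.g. on count_days_since_year_zero((5, 0, 3)): A returns 2195, B returns 1830; on count_days_since_year_zero((5, 14, 3)): A raises IndexError, B returns 2225
import Mathlib
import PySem

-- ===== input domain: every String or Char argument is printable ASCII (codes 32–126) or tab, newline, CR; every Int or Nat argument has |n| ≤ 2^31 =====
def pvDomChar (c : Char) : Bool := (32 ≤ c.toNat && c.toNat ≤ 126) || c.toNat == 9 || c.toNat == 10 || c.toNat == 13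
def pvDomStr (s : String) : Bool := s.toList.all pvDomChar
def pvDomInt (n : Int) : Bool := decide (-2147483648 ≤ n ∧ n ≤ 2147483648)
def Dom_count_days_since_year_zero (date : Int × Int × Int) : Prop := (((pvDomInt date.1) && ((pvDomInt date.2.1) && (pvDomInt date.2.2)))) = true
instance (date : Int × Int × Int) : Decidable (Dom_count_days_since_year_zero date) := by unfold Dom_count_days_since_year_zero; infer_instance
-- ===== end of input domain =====

-- B replaces A's cumulative month table + separate leap-day-indicator helper with a
-- per-month length function (Feb = 29 in leap years) summed over the elapsed months (objective: simpler).

-- ===== PORT A =====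
def check_if_leap_year (year : Int) : Bool :=
  if PySem.Int.mod year 4 ≠ 0 then false
  else if PySem.Int.mod year 100 ≠ 0 then true
  else if PySem.Int.mod year 400 ≠ 0 then false
  else true

def check_if_leap_day_this_year (date : Int × Int × Int) : Bool :=
  let year := date.1
  let month := date.2.1
  let day := date.2.2
  let leap_day_this_year := false
  if check_if_leap_year year then
    if month > 2 || (month == 2 && day == 29) then true else leap_day_this_year
  else leap_day_this_year

def count_leap_days_since_year_zero (date : Int × Int × Int) : Int :=
  let year := date.1
  let divisible_by_4 := PySem.Int.floordiv (year - 1) 4 + 1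
  let divisible_by_100 := PySem.Int.floordiv (year - 1) 100 + 1
  let divisible_by_400 := PySem.Int.floordiv (year - 1) 400 + 1
  let leap_day_this_year : Int := if check_if_leap_day_this_year date then 1 else 0
  divisible_by_4 - divisible_by_100 + divisible_by_400 + leap_day_this_year

def count_days_since_year_zero (date : Int × Int × Int) : Int :=
  let months : List Int := [0, 31, 28, 31, 30, 31, 30, 31, 31, 30, 31, 30, 31]
  let sum_months := (PySem.List.pyRange 1 (months.length : Int) 1).foldl
      (fun acc i => acc ++ [PySem.List.pyGetD acc (i - 1) 0 + PySem.List.pyGetD months i 0]) [(0 : Int)]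
  let year := date.1
  let month := date.2.1
  let day := date.2.2
  let days_before_this_year := year * 365
  let leap_days := count_leap_days_since_year_zero date
  let days_this_year := PySem.List.pyGetD sum_months (month - 1) 0 + day
  days_before_this_year + leap_days + days_this_year

-- ===== PORT B =====
def pvIsLeap (y : Int) : Bool :=
  PySem.Int.mod y 4 == 0 && (PySem.Int.mod y 100 != 0 || PySem.Int.mod y 400 == 0)

def pvMonthLen (m y : Int) : Int :=
  if m == 2 then (if pvIsLeap y then 29 else 28)
  else if [1, 3, 5, 7, 8, 10, 12].contains m then 31 else 30

def count_days_since_year_zero_alt (date : Int × Int × Int) : Int :=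
  let year := date.1
  let month := date.2.1
  let day := date.2.2
  let leaps_before := PySem.Int.floordiv (year - 1) 4 - PySem.Int.floordiv (year - 1) 100
      + PySem.Int.floordiv (year - 1) 400 + 1
  let days_in_months := ((PySem.List.pyRange 1 month 1).map (fun m => pvMonthLen m year)).sum
  365 * year + leaps_before + days_in_months + day

-- ===== PRECONDITION & SPEC =====
-- Pre_ restricts to calendar months 1..12: for month ≤ 0 A still returns a value only through
-- Python's negative-index wraparound into the cumulative table (and month = 13 hits index 12),
-- while |month - 1| > 13 makes A raise IndexError; both lie outside the natural date domain.
def Pre_count_days_since_year_zero (date : Int × Int × Int) : Prop :=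
  1 ≤ date.2.1 ∧ date.2.1 ≤ 12
instance (date : Int × Int × Int) : Decidable (Pre_count_days_since_year_zero date) := by
  unfold Pre_count_days_since_year_zero; infer_instance

def pvWitness_count_days_since_year_zero : (Int × Int × Int) := (2024, 3, 1)

-- On Feb 29 of a leap year A adds the leap day twice (once via `day` in the month offset, once via
-- leap_day_this_year), giving Feb 29 the same count as Mar 1; B counts it once, the intended ordinal.
def D_count_days_since_year_zero (date : Int × Int × Int) : Prop :=
  date.2.1 = 2 ∧ date.2.2 = 29 ∧ date.1 % 4 = 0 ∧ (date.1 % 100 ≠ 0 ∨ date.1 % 400 = 0)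
instance (date : Int × Int × Int) : Decidable (D_count_days_since_year_zero date) := by
  unfold D_count_days_since_year_zero; infer_instance

def Spec_count_days_since_year_zero (date : Int × Int × Int) (out : Int) : Prop :=
  ¬ D_count_days_since_year_zero date → out = count_days_since_year_zero_alt date
instance (date : Int × Int × Int) (out : Int) : Decidable (Spec_count_days_since_year_zero date out) := by
  unfold Spec_count_days_since_year_zero; infer_instance

def pvDiffWitness_count_days_since_year_zero : (Int × Int × Int) := (2024, 2, 29)
def pvDiffWitnessOut_count_days_since_year_zero : Int × Int := (739312, 739311)

-- ===== CLAIM (what is proved, stated in full; the proofs are below) =====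
def Claim_unchanged_count_days_since_year_zero : Prop := ∀ (date : Int × Int × Int), Dom_count_days_since_year_zero date → Pre_count_days_since_year_zero date → Spec_count_days_since_year_zero date (count_days_since_year_zero date)
def Claim_changed_count_days_since_year_zero : Prop := Dom_count_days_since_year_zero (pvDiffWitness_count_days_since_year_zero) ∧ Pre_count_days_since_year_zero (pvDiffWitness_count_days_since_year_zero) ∧ D_count_days_since_year_zero (pvDiffWitness_count_days_since_year_zero) ∧ count_days_since_year_zero (pvDiffWitness_count_days_since_year_zero) = pvDiffWitnessOut_count_days_since_year_zero.1 ∧ count_days_since_year_zero_alt (pvDiffWitness_count_days_since_year_zero) = pvDiffWitnessOut_count_days_since_year_zero.2 ∧ pvDiffWitnessOut_count_days_since_year_zero.1 ≠ pvDiffWitnessOut_count_days_since_year_zero.2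
def Claim_exact_count_days_since_year_zero : Prop := ∀ (date : Int × Int × Int), Dom_count_days_since_year_zero date → Pre_count_days_since_year_zero date → D_count_days_since_year_zero date → count_days_since_year_zero date ≠ count_days_since_year_zero_alt date

-- ===== LEMMAS AND PROOFS =====

set_option maxHeartbeats 3200000 in
theorem pv_main : ∀ (y m d : Int), 1 ≤ m → m ≤ 12 →
    (¬ D_count_days_since_year_zero (y, m, d) →
      count_days_since_year_zero (y, m, d) = count_days_since_year_zero_alt (y, m, d)) ∧
    (D_count_days_since_year_zero (y, m, d) →
      count_days_since_year_zero (y, m, d) = count_days_since_year_zero_alt (y, m, d) + 1) := by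
  intro y m d h1 h2
  have hsum : (PySem.List.pyRange 1 ((([0, 31, 28, 31, 30, 31, 30, 31, 31, 30, 31, 30, 31] : List Int)).length : Int) 1).foldl
      (fun acc i => acc ++ [PySem.List.pyGetD acc (i - 1) 0 + PySem.List.pyGetD ([0, 31, 28, 31, 30, 31, 30, 31, 31, 30, 31, 30, 31] : List Int) i 0]) [(0 : Int)]
      = [0, 31, 59, 90, 120, 151, 181, 212, 243, 273, 304, 334, 365] := by decide
  simp only [count_days_since_year_zero, count_days_since_year_zero_alt,
    count_leap_days_since_year_zero, check_if_leap_day_this_year,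
    D_count_days_since_year_zero, hsum]
  by_cases h4 : y % 4 = 0 <;> by_cases h100 : y % 100 = 0 <;> by_cases h400 : y % 400 = 0 <;>
    interval_cases m <;>
    simp [check_if_leap_year, pvMonthLen, pvIsLeap, PySem.List.pyRange, PySem.List.pyGetD,
      List.range_succ, h4, h100, h400] <;>
    omega

-- ===== VERDICT (by name: the statement is the Claim_ definition above) =====
theorem count_days_since_year_zero_spec : Claim_unchanged_count_days_since_year_zero := by
  rintro ⟨y, m, d⟩ _ ⟨h1, h2⟩ hnd
  exact (pv_main y m d h1 h2).1 hnd

theorem count_days_since_year_zero_changed : Claim_changed_count_days_since_year_zero := by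
  unfold Claim_changed_count_days_since_year_zero; decide

theorem count_days_since_year_zero_tight : Claim_exact_count_days_since_year_zero := by
  rintro ⟨y, m, d⟩ _ ⟨h1, h2⟩ hd
  have := (pv_main y m d h1 h2).2 hd
  omega
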